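-- pv_equiv track=rewrite | github.com/rishi-2410/NocturneIDE | WebBrowser/CookieJar/CookieJar.py | __isOnDomainList
-- ===== SOURCE A (Python) =====
-- def __isOnDomainList(rules, domain):
--     """
--     Private method to check, if either the rule matches the domain exactly
--     or the domain ends with ".rule".
--
--     @param rules list of rules
--     @type list of str
--     @param domain domain name to check
--     @type str
--     @return flag indicating a match
--     @rtype bool
--     """
--     for rule in rules:
--         if rule.startswith("."):
--             if domain.endswith(rule):
--                 return True
--
--             withoutDot = rule[1:]
--             if domain == withoutDot:
--                 return True
--         else:
--             domainEnding = domain[-(len(rule) + 1) :]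
--             if domainEnding and domainEnding[0] == "." and domain.endswith(rule):
--                 return True
--
--             if rule == domain:
--                 return True
--
--     return False
-- ===== SOURCE B (Python) =====
-- def __isOnDomainList(rules, domain):
--     bases = {r[1:] if r.startswith(".") else r for r in rules}
--     if domain in bases:
--         return True
--     for i, ch in enumerate(domain):
--         if ch == "." and domain[i + 1:] in bases:
--             return True
--     return False
-- ===== Notes on version B (the rewrite author's own statement) =====
-- stated objective: idiomatic
-- what changed: Instead of scanning every rule and doing per-rule suffix/slice arithmetic against the domain, B builds one set of rule bases (rule minus its optional leading dot) and checks the domain itself plus the suffix after each dot of the domain for set membership.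
import Mathlib
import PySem

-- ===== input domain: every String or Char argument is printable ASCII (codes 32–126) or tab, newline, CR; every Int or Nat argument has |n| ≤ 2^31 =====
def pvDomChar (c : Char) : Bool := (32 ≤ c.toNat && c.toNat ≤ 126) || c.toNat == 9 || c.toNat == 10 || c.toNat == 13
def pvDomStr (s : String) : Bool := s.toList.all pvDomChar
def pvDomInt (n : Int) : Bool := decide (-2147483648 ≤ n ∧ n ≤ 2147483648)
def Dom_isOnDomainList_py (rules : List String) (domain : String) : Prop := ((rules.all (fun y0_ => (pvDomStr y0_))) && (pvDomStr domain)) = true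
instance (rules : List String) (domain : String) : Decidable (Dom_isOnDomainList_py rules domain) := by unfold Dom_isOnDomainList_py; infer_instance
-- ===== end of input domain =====

-- B replaces A's per-rule suffix arithmetic by one set of rule bases plus a scan of the
-- domain's dot boundaries with set lookups (idiomatic; same cost class); return value only.

-- ===== PORT A =====
-- literal transliteration of __isOnDomainList: scan the rules, early return True on a match
def isOnDomainList_py (rules : List String) (domain : String) : Bool :=
  match rules with
  | [] => false
  | rule :: rest =>
    if PySem.Str.startswith rule "." then
      if PySem.Str.endswith domain rule then true
      else
        -- withoutDot = rule[1:]
        if domain == PySem.Str.slice rule (some 1) none then true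
        else isOnDomainList_py rest domain
    else
      -- domainEnding = domain[-(len(rule) + 1):]
      let domainEnding := PySem.Str.slice domain (some (-(PySem.Str.len rule + 1))) none
      -- 'domainEnding and domainEnding[0] == "." and domain.endswith(rule)'
      if (!(domainEnding == "")) && (PySem.Str.pyGet? domainEnding 0 == some '.')
          && PySem.Str.endswith domain rule then true
      else if rule == domain then true
      else isOnDomainList_py rest domain

-- ===== PORT B =====
-- transliteration of Source B: build the set of rule bases once, then test the domain itself
-- and the suffix after every '.' of the domain for membership
def isOnDomainList_py_alt (rules : List String) (domain : String) : Bool :=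
  let bases : PySem.Set String :=
    PySem.Set.ofList (rules.map (fun r =>
      if PySem.Str.startswith r "." then PySem.Str.slice r (some 1) none else r))
  if PySem.Set.contains bases domain then true
  else
    (PySem.List.enumerate domain.toList 0).any (fun p =>
      p.2 == '.' && PySem.Set.contains bases (PySem.Str.slice domain (some (p.1 + 1)) none))

-- ===== PRECONDITION & SPEC =====
def Spec_isOnDomainList_py (rules : List String) (domain : String) (out : Bool) : Prop := out = isOnDomainList_py_alt rules domain
instance (rules : List String) (domain : String) (out : Bool) : Decidable (Spec_isOnDomainList_py rules domain out) := by unfold Spec_isOnDomainList_py; infer_instance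

-- ===== CLAIM (what is proved, stated in full; the proofs are below) =====
def Claim_equal_isOnDomainList_py : Prop := ∀ (rules : List String) (domain : String), Dom_isOnDomainList_py rules domain → Spec_isOnDomainList_py rules domain (isOnDomainList_py rules domain)

-- ===== LEMMAS AND PROOFS =====

-- the "base" of a rule: the rule without its leading dot (both programs compare against it)
def pvBase (r : String) : List Char :=
  if r.toList.head? = some '.' then r.toList.tail else r.toList

-- the matching relation both programs decide, rule by rule
def pvP (r d : String) : Prop := pvBase r = d.toList ∨ '.' :: pvBase r <:+ d.toList

-- string == is toList equality
theorem pv_beq_iff (s t : String) : (s == t) = true ↔ s.toList = t.toList := by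
  rw [beq_iff_eq]; exact ⟨fun h => h ▸ rfl, fun h => String.ext h⟩

theorem pv_startswith_dot (r : String) :
    PySem.Str.startswith r "." = true ↔ r.toList.head? = some '.' := by
  have h : PySem.Str.startswith r "." = true ↔ ['.'] <+: r.toList := by
    simpa using PySem.Chars.startswith_iff r.toList ['.']
  rw [h]
  cases r.toList with
  | nil => simp
  | cons c t => simp [List.cons_prefix_cons, eq_comm]

theorem pv_slice_one_toList (s : String) :
    (PySem.Str.slice s (some 1) none).toList = s.toList.tail := by
  rw [show (PySem.Str.slice s (some 1) none) = String.ofList (PySem.Chars.slice s.toList (some 1) none) from rfl]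
  simp [PySem.Chars.slice_eq_listSlice, PySem.List.slice_from_one]

theorem pv_pyGet_zero (l : List Char) : PySem.List.pyGet? l 0 = l.head? := by
  cases l <;> simp [PySem.List.pyGet?, PySem.List.pyIdx?]

-- a cons suffix, described by the dot position in the big list
theorem pv_cons_suffix_iff (c : Char) (l d : List Char) :
    c :: l <:+ d ↔ ∃ (k : Nat) (h : k < d.length), d[k] = c ∧ d.drop (k + 1) = l := by
  constructor
  · intro h
    have hlen : l.length + 1 ≤ d.length := by
      have := h.length_le; simpa using this
    have hd := List.suffix_iff_eq_drop.mp h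
    refine ⟨d.length - (l.length + 1), by omega, ?_⟩
    have hk : d.length - (l.length + 1) < d.length := by omega
    have hdrop : d.drop (d.length - (l.length + 1)) =
        d[d.length - (l.length + 1)] :: d.drop (d.length - (l.length + 1) + 1) :=
      List.drop_eq_getElem_cons hk
    rw [show (c :: l).length = l.length + 1 from rfl] at hd
    rw [hdrop] at hd
    injection hd.symm with h1 h2
    exact ⟨h1, h2⟩
  · rintro ⟨k, hk, hc, hl⟩
    have := List.drop_eq_getElem_cons hk
    rw [hc, hl] at this
    rw [← this]
    exact List.drop_suffix k d

-- an early-return chain of two tests is a three-way disjunction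
theorem pv_if3 (b1 b2 x : Bool) :
    (if b1 = true then true else if b2 = true then true else x) = true ↔
      (b1 = true ∨ b2 = true ∨ x = true) := by
  by_cases h1 : b1 = true <;> by_cases h2 : b2 = true <;> simp [h1, h2]

theorem pv_endswith_iff (s p : String) :
    PySem.Str.endswith s p = true ↔ p.toList <:+ s.toList := by
  simpa using PySem.Chars.endswith_iff s.toList p.toList

theorem pv_len_eq (s : String) : PySem.Str.len s = (s.toList.length : Int) := by
  simp [PySem.Str.len_eq]

theorem pv_slice_neg_toList (d : String) (m : Nat) :
    (PySem.Str.slice d (some (-((m : Int) + 1))) none).toList =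
      d.toList.drop (d.toList.length - (m + 1)) := by
  rw [show (PySem.Str.slice d (some (-((m : Int) + 1))) none) =
      String.ofList (PySem.Chars.slice d.toList (some (-((m : Int) + 1))) none) from rfl]
  rw [show (some (-((m : Int) + 1)) : Option Int) = some (-(((m + 1 : Nat) : Int))) from by
    push_cast; ring_nf]
  rw [PySem.Chars.slice_eq_listSlice, PySem.List.slice_from_neg_natCast _ (m + 1) (by omega),
    String.toList_ofList]

-- the no-leading-dot branch of A tests exactly for the suffix ".rule"
theorem pv_nodot_iff (l dl : List Char) (hl : l.head? ≠ some '.') :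
    (dl.drop (dl.length - (l.length + 1)) ≠ [] ∧
      (dl.drop (dl.length - (l.length + 1))).head? = some '.' ∧ l <:+ dl) ↔
      '.' :: l <:+ dl := by
  constructor
  · rintro ⟨h1, h2, h3⟩
    have hm : l.length ≤ dl.length := h3.length_le
    by_cases hn : l.length + 1 ≤ dl.length
    · have hk : dl.length - (l.length + 1) < dl.length := by omega
      have hdrop := List.drop_eq_getElem_cons hk
      have hsfx := List.suffix_iff_eq_drop.mp h3
      have hk1 : dl.length - (l.length + 1) + 1 = dl.length - l.length := by omega
      simp only [hdrop, List.head?_cons, Option.some.injEq] at h2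
      have hout : dl.drop (dl.length - (l.length + 1)) = '.' :: l := by
        rw [hdrop, hk1, ← hsfx, h2]
      rw [← hout]
      exact List.drop_suffix _ dl
    · have hml : l.length = dl.length := by omega
      have hzero : dl.length - (l.length + 1) = 0 := by omega
      rw [hzero, List.drop_zero] at h2
      have hld : l = dl := by
        have := List.suffix_iff_eq_drop.mp h3
        simpa [hml] using this
      exact absurd (hld ▸ h2) hl
  · intro h
    have hm1 : l.length + 1 ≤ dl.length := by
      have := h.length_le; simpa using this
    have hsfx := List.suffix_iff_eq_drop.mp h
    rw [show (('.' :: l).length) = l.length + 1 from rfl] at hsfx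
    refine ⟨by rw [← hsfx]; simp, by rw [← hsfx]; simp, ?_⟩
    exact (List.suffix_cons '.' l).trans h

theorem pvA_iff (rules : List String) (d : String) :
    isOnDomainList_py rules d = true ↔ ∃ r ∈ rules, pvP r d := by
  induction rules with
  | nil => simp [isOnDomainList_py]
  | cons rule rest ih =>
    have hstep : isOnDomainList_py (rule :: rest) d = true ↔
        (pvP rule d ∨ isOnDomainList_py rest d = true) := by
      by_cases hsw : PySem.Str.startswith rule "." = true
      · -- rule starts with "."
        obtain ⟨t, ht⟩ : ∃ t, rule.toList = '.' :: t := by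
          have := (pv_startswith_dot rule).mp hsw
          cases hc : rule.toList with
          | nil => rw [hc] at this; simp at this
          | cons c t => rw [hc] at this; simp at this; exact ⟨t, by rw [this]⟩
        have hbase : pvBase rule = t := by simp [pvBase, ht]
        rw [show isOnDomainList_py (rule :: rest) d =
            (if PySem.Str.endswith d rule = true then true
             else if (d == PySem.Str.slice rule (some 1) none) = true then true
             else isOnDomainList_py rest d) from by
          simp only [isOnDomainList_py]; rw [if_pos hsw]]
        rw [pv_if3, pv_endswith_iff, pv_beq_iff, pv_slice_one_toList, pvP, hbase, ht]
        simp only [List.tail_cons]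
        constructor
        · rintro (h | h | h)
          · exact Or.inl (Or.inr h)
          · exact Or.inl (Or.inl h.symm)
          · exact Or.inr h
        · rintro ((h | h) | h)
          · exact Or.inr (Or.inl h.symm)
          · exact Or.inl h
          · exact Or.inr (Or.inr h)
      · -- rule does not start with "."
        have hl : rule.toList.head? ≠ some '.' := fun hc =>
          hsw ((pv_startswith_dot rule).mpr hc)
        have hbase : pvBase rule = rule.toList := by
          simp [pvBase, if_neg hl]
        rw [show isOnDomainList_py (rule :: rest) d =
            (if ((!((PySem.Str.slice d (some (-(PySem.Str.len rule + 1))) none) == ""))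
                  && (PySem.Str.pyGet? (PySem.Str.slice d (some (-(PySem.Str.len rule + 1))) none) 0 == some '.')
                  && PySem.Str.endswith d rule) = true then true
             else if (rule == d) = true then true
             else isOnDomainList_py rest d) from by
          simp only [isOnDomainList_py]; rw [if_neg hsw]]
        rw [pv_if3, pv_len_eq]
        have hsl := pv_slice_neg_toList d rule.toList.length
        have e1 : (!((PySem.Str.slice d (some (-((rule.toList.length : Int) + 1))) none) == "")) = true ↔
            (PySem.Str.slice d (some (-((rule.toList.length : Int) + 1))) none).toList ≠ [] := by
          rw [Bool.not_eq_true', Bool.eq_false_iff, Ne, Ne, pv_beq_iff,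
            show ("" : String).toList = [] from rfl]
        have e2 : (PySem.Str.pyGet? (PySem.Str.slice d (some (-((rule.toList.length : Int) + 1))) none) 0 == some '.') = true ↔
            (PySem.Str.slice d (some (-((rule.toList.length : Int) + 1))) none).toList.head? = some '.' := by
          rw [beq_iff_eq,
            show PySem.Str.pyGet? (PySem.Str.slice d (some (-((rule.toList.length : Int) + 1))) none) 0
              = PySem.List.pyGet? (PySem.Str.slice d (some (-((rule.toList.length : Int) + 1))) none).toList 0 from by simp,
            pv_pyGet_zero]
        have hb1 : ((!((PySem.Str.slice d (some (-((rule.toList.length : Int) + 1))) none) == ""))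
              && (PySem.Str.pyGet? (PySem.Str.slice d (some (-((rule.toList.length : Int) + 1))) none) 0 == some '.')
              && PySem.Str.endswith d rule) = true ↔ '.' :: rule.toList <:+ d.toList := by
          simp only [Bool.and_eq_true]
          rw [e1, e2, pv_endswith_iff, hsl, and_assoc]
          exact pv_nodot_iff rule.toList d.toList hl
        rw [hb1, pv_beq_iff, pvP, hbase]
        constructor
        · rintro (h | h | h)
          · exact Or.inl (Or.inr h)
          · exact Or.inl (Or.inl h)
          · exact Or.inr h
        · rintro ((h | h) | h)
          · exact Or.inr (Or.inl h)
          · exact Or.inl h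
          · exact Or.inr (Or.inr h)
    rw [hstep, ih, List.exists_mem_cons_iff]

-- the base a rule contributes to B's set, as a character list
theorem pv_base'_toList (r : String) :
    (if PySem.Str.startswith r "." then PySem.Str.slice r (some 1) none else r).toList = pvBase r := by
  by_cases h : PySem.Str.startswith r "." = true
  · rw [if_pos h, pv_slice_one_toList, pvBase, if_pos ((pv_startswith_dot r).mp h)]
  · rw [if_neg h, pvBase, if_neg (fun hc => h ((pv_startswith_dot r).mpr hc))]

theorem pv_contains_iff (rules : List String) (s : String) :
    PySem.Set.contains (PySem.Set.ofList (rules.map (fun r =>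
      if PySem.Str.startswith r "." then PySem.Str.slice r (some 1) none else r))) s = true ↔
    ∃ r ∈ rules, pvBase r = s.toList := by
  rw [show (PySem.Set.contains (PySem.Set.ofList (rules.map (fun r =>
      if PySem.Str.startswith r "." then PySem.Str.slice r (some 1) none else r))) s = true) ↔
      s ∈ rules.map (fun r =>
        if PySem.Str.startswith r "." then PySem.Str.slice r (some 1) none else r) from by
    simp [PySem.Set.contains, PySem.Set.mem_ofList]]
  rw [List.mem_map]
  constructor
  · rintro ⟨r, hr, hs⟩
    exact ⟨r, hr, by rw [← pv_base'_toList r, hs]⟩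
  · rintro ⟨r, hr, hs⟩
    refine ⟨r, hr, ?_⟩
    apply String.ext
    rw [pv_base'_toList r, hs]

theorem pv_slice_pos_toList (d : String) (k : Nat) :
    (PySem.Str.slice d (some ((k : Nat) : Int)) none).toList = d.toList.drop k := by
  rw [show (PySem.Str.slice d (some ((k : Nat) : Int)) none) =
      String.ofList (PySem.Chars.slice d.toList (some ((k : Nat) : Int)) none) from rfl]
  rw [PySem.Chars.slice_eq_listSlice, PySem.List.slice_from_natCast, String.toList_ofList]

theorem pvB_iff (rules : List String) (d : String) :
    isOnDomainList_py_alt rules d = true ↔ ∃ r ∈ rules, pvP r d := by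
  rw [show isOnDomainList_py_alt rules d =
      (if PySem.Set.contains (PySem.Set.ofList (rules.map (fun r =>
            if PySem.Str.startswith r "." then PySem.Str.slice r (some 1) none else r))) d then true
       else (PySem.List.enumerate d.toList 0).any (fun p =>
          p.2 == '.' && PySem.Set.contains (PySem.Set.ofList (rules.map (fun r =>
            if PySem.Str.startswith r "." then PySem.Str.slice r (some 1) none else r)))
            (PySem.Str.slice d (some (p.1 + 1)) none))) from rfl]
  by_cases hC : PySem.Set.contains (PySem.Set.ofList (rules.map (fun r =>
      if PySem.Str.startswith r "." then PySem.Str.slice r (some 1) none else r))) d = true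
  · rw [if_pos hC]
    obtain ⟨r, hr, hs⟩ := (pv_contains_iff rules d).mp hC
    exact iff_of_true rfl ⟨r, hr, Or.inl hs⟩
  · rw [if_neg hC, List.any_eq_true]
    constructor
    · rintro ⟨p, hp, hpred⟩
      obtain ⟨k, hk, rfl⟩ := (PySem.List.mem_enumerate_iff d.toList 0 p).mp hp
      simp only [Bool.and_eq_true, beq_iff_eq] at hpred
      obtain ⟨hdot, hcont⟩ := hpred
      have hcast : ((0 : Int) + (k : Int)) + 1 = (((k + 1 : Nat)) : Int) := by push_cast; ring
      rw [hcast] at hcont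
      obtain ⟨r, hr, hs⟩ := (pv_contains_iff rules _).mp hcont
      rw [pv_slice_pos_toList] at hs
      refine ⟨r, hr, Or.inr ?_⟩
      exact (pv_cons_suffix_iff '.' (pvBase r) d.toList).mpr ⟨k, hk, hdot, hs.symm⟩
    · rintro ⟨r, hr, hP | hP⟩
      · exact absurd ((pv_contains_iff rules d).mpr ⟨r, hr, hP⟩) hC
      · obtain ⟨k, hk, hdot, hdrop⟩ := (pv_cons_suffix_iff '.' (pvBase r) d.toList).mp hP
        refine ⟨((0 : Int) + (k : Int), d.toList[k]), ?_, ?_⟩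
        · exact (PySem.List.mem_enumerate_iff d.toList 0 _).mpr ⟨k, hk, rfl⟩
        · simp only [Bool.and_eq_true, beq_iff_eq]
          refine ⟨hdot, ?_⟩
          have hcast : ((0 : Int) + (k : Int)) + 1 = (((k + 1 : Nat)) : Int) := by push_cast; ring
          rw [hcast]
          exact (pv_contains_iff rules _).mpr ⟨r, hr, by rw [pv_slice_pos_toList, hdrop]⟩

-- ===== VERDICT (by name: the statement is the Claim_ definition above) =====
theorem isOnDomainList_py_spec : Claim_equal_isOnDomainList_py := by
  intro rules domain _
  unfold Spec_isOnDomainList_py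
  rw [Bool.eq_iff_iff, pvA_iff, pvB_iff]
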